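-- pv_equiv track=rewrite | github.com/rafaelGuasselli/exercicios | judges/beecrowd/2458.py | dfs
-- ===== SOURCE A (Python) =====
-- def dfs(pos, matrix, profundidade, count, memo):
-- 	y, x = pos
-- 	valor = getValue(pos, matrix)
-- 	if valor == False:
-- 		memo[count] = False
-- 		return 0
-- 	elif valor.isdigit():
-- 		if valor == count:
-- 			memo[count] = True
-- 			return profundidade
-- 		elif not valor in memo or memo[valor]:
-- 			memo[count] = True
-- 			return profundidade
-- 		else:
-- 			memo[count] = False
-- 			return 0
--
-- 	matrix[y][x] = str(count)
-- 	if valor == "V":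
-- 		return dfs((y+1, x), matrix, profundidade+1, count, memo)
-- 	elif valor == "A":
-- 		return dfs((y-1, x), matrix, profundidade+1, count, memo)
-- 	elif valor == ">":
-- 		return dfs((y, x+1), matrix, profundidade+1, count, memo)
-- 	elif valor == "<":
-- 		return dfs((y, x-1), matrix, profundidade+1, count, memo)
--
-- def getValue(pos, matrix):
-- 	y, x = pos
-- 	if y >= 0 and y < len(matrix) and x >= 0 and x < len(matrix[y]):
-- 		return matrix[y][x]
-- 	return False
-- ===== SOURCE B (Python) =====
-- def dfs(pos, matrix, profundidade, count, memo):
--     moves = {"V": (1, 0), "A": (-1, 0), ">": (0, 1), "<": (0, -1)}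
--     y, x = pos
--     seen = set()
--     while True:
--         if not (0 <= y < len(matrix) and 0 <= x < len(matrix[y])):
--             memo[count] = False
--             return 0
--         valor = count if (y, x) in seen else matrix[y][x]
--         if valor.isdigit():
--             ok = valor == count or memo.get(valor, True)
--             memo[count] = ok
--             return profundidade if ok else 0
--         if valor not in moves:
--             return None
--         seen.add((y, x))
--         dy, dx = moves[valor]
--         y += dy
--         x += dx
--         profundidade += 1
-- ===== Notes on version B (the rewrite author's own statement) =====
-- stated objective: alternative
-- what changed: Replaces A's recursion that mutates matrix cells in place by an iterative while-loop that keeps the matrix intact and tracks overwritten cells in a visited set (plus a move table instead of the if/elif arrow chain).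
import Mathlib
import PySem

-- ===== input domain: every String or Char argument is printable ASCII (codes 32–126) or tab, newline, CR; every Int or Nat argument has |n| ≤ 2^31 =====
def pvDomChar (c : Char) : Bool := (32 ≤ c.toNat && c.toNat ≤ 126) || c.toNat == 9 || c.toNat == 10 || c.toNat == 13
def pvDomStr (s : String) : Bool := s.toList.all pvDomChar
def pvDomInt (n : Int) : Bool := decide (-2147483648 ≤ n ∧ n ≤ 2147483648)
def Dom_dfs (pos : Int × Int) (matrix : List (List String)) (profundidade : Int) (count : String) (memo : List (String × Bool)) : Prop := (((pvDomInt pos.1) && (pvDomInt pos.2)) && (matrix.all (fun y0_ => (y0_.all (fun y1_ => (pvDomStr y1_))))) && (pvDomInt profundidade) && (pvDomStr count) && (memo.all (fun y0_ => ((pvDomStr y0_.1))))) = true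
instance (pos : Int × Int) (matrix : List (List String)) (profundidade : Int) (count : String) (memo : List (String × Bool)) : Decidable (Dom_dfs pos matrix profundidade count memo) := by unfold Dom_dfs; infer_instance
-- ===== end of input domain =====

-- B replaces A's recursion-with-in-place-matrix-mutation by an iterative walk keeping the matrix intact and a
-- visited set; equivalence is about the RETURN value only: Python A overwrites traversed matrix cells in place,
-- Python B does not (the memo dict is written identically by both).

-- Fuel for the (always terminating where Python terminates) walk: each cell is freshly visited at most once, and
-- between fresh visits every step moves monotonically in one fixed direction, so the walk takes fewer steps than this.
def pvFuel (matrix : List (List String)) : Nat :=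
  let c := (matrix.map List.length).foldr Nat.max 0
  (matrix.length * c + 2) * (matrix.length + c + 2)

-- ===== PORT A =====
def getValue (pos : Int × Int) (matrix : List (List String)) : Option String :=
  -- Python's getValue returns False out of bounds; `none` plays the role of False here
  if 0 ≤ pos.1 ∧ pos.1 < (matrix.length : Int) ∧ 0 ≤ pos.2 ∧ pos.2 < ((matrix.getD pos.1.toNat []).length : Int)
  then some ((matrix.getD pos.1.toNat []).getD pos.2.toNat "")
  else none

def dfsA : Nat → Int × Int → List (List String) → Int → String → List (String × Bool) → Int
  | 0, _, _, _, _, _ => 0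
  | fuel + 1, (y, x), matrix, profundidade, count, memo =>
    match getValue (y, x) matrix with
    | none => 0                      -- memo[count] = False; return 0 (memo mutation is not part of the return value)
    | some valor =>
      if PySem.Str.strIsdigit valor then
        if valor = count then profundidade
        else if ¬ (PySem.Dict.mk memo).contains valor = true
                ∨ ((PySem.Dict.mk memo).get? valor).getD false = true then profundidade
        else 0
      else
        -- matrix[y][x] = str(count); str(count) = count since count is already a str
        let matrix' := matrix.set y.toNat ((matrix.getD y.toNat []).set x.toNat count)
        if valor = "V" then dfsA fuel (y + 1, x) matrix' (profundidade + 1) count memo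
        else if valor = "A" then dfsA fuel (y - 1, x) matrix' (profundidade + 1) count memo
        else if valor = ">" then dfsA fuel (y, x + 1) matrix' (profundidade + 1) count memo
        else if valor = "<" then dfsA fuel (y, x - 1) matrix' (profundidade + 1) count memo
        else 0                        -- Python returns None here; excluded by Pre_dfs

def dfs (pos : Int × Int) (matrix : List (List String)) (profundidade : Int) (count : String) (memo : List (String × Bool)) : Int :=
  dfsA (pvFuel matrix) pos matrix profundidade count memo

-- ===== PORT B =====
def pvMoves : PySem.Dict String (Int × Int) :=
  PySem.Dict.mk [("V", (1, 0)), ("A", (-1, 0)), (">", (0, 1)), ("<", (0, -1))]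

def dfsLoop : Nat → Int → Int → List (List String) → Int → String → List (String × Bool) → PySem.Set (Int × Int) → Int
  | 0, _, _, _, _, _, _, _ => 0
  | fuel + 1, y, x, matrix, profundidade, count, memo, seen =>
    if 0 ≤ y ∧ y < (matrix.length : Int) ∧ 0 ≤ x ∧ x < ((matrix.getD y.toNat []).length : Int) then
      let valor := if PySem.Set.contains seen (y, x) then count
                   else (matrix.getD y.toNat []).getD x.toNat ""
      if PySem.Str.strIsdigit valor then
        if valor = count ∨ ((PySem.Dict.mk memo).get? valor).getD true = true then profundidade else 0
      else
        match pvMoves.get? valor with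
        | none => 0                  -- Python B returns None here; excluded by Pre_dfs
        | some (dy, dx) =>
          dfsLoop fuel (y + dy) (x + dx) matrix (profundidade + 1) count memo (PySem.Set.add seen (y, x))
    else 0                           -- memo[count] = False; return 0

def dfs_alt (pos : Int × Int) (matrix : List (List String)) (profundidade : Int) (count : String) (memo : List (String × Bool)) : Int :=
  dfsLoop (pvFuel matrix) pos.1 pos.2 matrix profundidade count memo PySem.Set.empty

-- ===== PRECONDITION & SPEC =====
def pvDelta (v : String) : Option (Int × Int) :=
  if v = "V" then some (1, 0) else if v = "A" then some (-1, 0)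
  else if v = ">" then some (0, 1) else if v = "<" then some (0, -1) else none

-- pvSafe classifies the INPUT only (it computes neither program's output — no depth, no memo): does the arrow
-- chain of the grid starting at (y,x) — an already-traversed cell holds count — ever land on an in-bounds value
-- that is neither a digit string nor one of V/A/>/<?  Reachability along the arrows is inherently a property of
-- the chain, so it is stated as this walk; pvFuel steps always suffice, so `true` at fuel 0 is unreachable.
def pvSafe : Nat → Int → Int → List (List String) → String → PySem.Set (Int × Int) → Bool
  | 0, _, _, _, _, _ => true
  | fuel + 1, y, x, matrix, count, seen =>
    if 0 ≤ y ∧ y < (matrix.length : Int) ∧ 0 ≤ x ∧ x < ((matrix.getD y.toNat []).length : Int) then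
      let valor := if PySem.Set.contains seen (y, x) then count
                   else (matrix.getD y.toNat []).getD x.toNat ""
      if PySem.Str.strIsdigit valor then true
      else
        match pvDelta valor with
        | none => false
        | some (dy, dx) => pvSafe fuel (y + dy) (x + dx) matrix count (PySem.Set.add seen (y, x))
    else true

-- Pre_dfs excludes exactly the inputs whose arrow chain reaches an in-bounds cell whose current value is neither
-- a digit string nor an arrow V/A/>/<: there Python A falls through every branch and returns None (Python B too),
-- which is not a value of the declared int type.  On every input where A returns an int, Pre_dfs holds.
def Pre_dfs (pos : Int × Int) (matrix : List (List String)) (profundidade : Int) (count : String) (memo : List (String × Bool)) : Prop :=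
  pvSafe (pvFuel matrix) pos.1 pos.2 matrix count PySem.Set.empty = true

instance (pos : Int × Int) (matrix : List (List String)) (profundidade : Int) (count : String) (memo : List (String × Bool)) : Decidable (Pre_dfs pos matrix profundidade count memo) := by unfold Pre_dfs; infer_instance

def pvWitness_dfs : (Int × Int) × List (List String) × Int × String × (List (String × Bool)) :=
  ((0, 0), [[">", "1"]], 0, "1", [])

def Spec_dfs (pos : Int × Int) (matrix : List (List String)) (profundidade : Int) (count : String) (memo : List (String × Bool)) (out : Int) : Prop := out = dfs_alt pos matrix profundidade count memo
instance (pos : Int × Int) (matrix : List (List String)) (profundidade : Int) (count : String) (memo : List (String × Bool)) (out : Int) : Decidable (Spec_dfs pos matrix profundidade count memo out) := by unfold Spec_dfs; infer_instance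

-- ===== CLAIM =====
def Claim_equal_dfs : Prop := ∀ (pos : Int × Int) (matrix : List (List String)) (profundidade : Int) (count : String) (memo : List (String × Bool)), Dom_dfs pos matrix profundidade count memo → Pre_dfs pos matrix profundidade count memo → Spec_dfs pos matrix profundidade count memo (dfs pos matrix profundidade count memo)

-- ===== LEMMAS AND PROOFS =====

-- Invariant relating A's mutated matrix to B's untouched matrix plus visited set:
-- same shape, and each in-bounds cell holds `count` if visited, its original value otherwise.
def MEq (m0 mA : List (List String)) (seen : PySem.Set (Int × Int)) (count : String) : Prop :=
  mA.length = m0.length ∧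
  (∀ i : Nat, (mA.getD i []).length = (m0.getD i []).length) ∧
  (∀ i j : Nat, i < m0.length → j < (m0.getD i []).length →
    (mA.getD i []).getD j "" =
      if PySem.Set.contains seen ((i : Int), (j : Int)) then count else (m0.getD i []).getD j "")

lemma MEq_nil (m0 : List (List String)) (count : String) : MEq m0 m0 PySem.Set.empty count := by
  refine ⟨rfl, fun i => rfl, fun i j _ _ => by simp [PySem.Set.empty, PySem.Set.contains]⟩

lemma MEq_step (m0 mA : List (List String)) (seen : PySem.Set (Int × Int)) (count : String)
    (y x : Int) (hy0 : 0 ≤ y) (hy : y < (m0.length : Int)) (hx0 : 0 ≤ x)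
    (hx : x < ((m0.getD y.toNat []).length : Int)) (h : MEq m0 mA seen count) :
    MEq m0 (mA.set y.toNat ((mA.getD y.toNat []).set x.toNat count)) (PySem.Set.add seen (y, x)) count := by
  obtain ⟨h1, h2, h3⟩ := h
  have hyn : y.toNat < m0.length := by omega
  have hynA : y.toNat < mA.length := by omega
  have hxn : x.toNat < (m0.getD y.toNat []).length := by omega
  have hxnA : x.toNat < (mA.getD y.toNat []).length := by rw [h2]; exact hxn
  have hyc : ((y.toNat : Int)) = y := Int.toNat_of_nonneg hy0
  have hxc : ((x.toNat : Int)) = x := Int.toNat_of_nonneg hx0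
  refine ⟨by simp [h1], ?_, ?_⟩
  · intro i
    by_cases hi : y.toNat = i
    · subst hi
      have h2' := h2 y.toNat
      simp only [List.getD] at h2' ⊢
      simp [hynA]
      simpa [List.getElem?_eq_getElem hynA] using h2'
    · simp only [List.getD]
      rw [List.getElem?_set_ne hi]
      exact h2 i
  · intro i j him hjm
    have hcont : ∀ p : Int × Int,
        (PySem.Set.contains (PySem.Set.add seen (y, x)) p = true) ↔ (p ∈ seen ∨ p = (y, x)) := by
      intro p; rw [PySem.Set.contains_iff, PySem.Set.mem_add]
    by_cases hi : y.toNat = i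
    · subst hi
      have hrow : ((mA.set y.toNat ((mA.getD y.toNat []).set x.toNat count)).getD y.toNat []) =
          (mA.getD y.toNat []).set x.toNat count := by
        simp [List.getD, hynA]
      rw [hrow]
      by_cases hj : x.toNat = j
      · subst hj
        have hxA : x.toNat < (mA[y.toNat]?.getD []).length := by simpa [List.getD] using hxnA
        have : ((mA.getD y.toNat []).set x.toNat count).getD x.toNat "" = count := by
          simp [List.getD, hxA]
        rw [this]
        have : PySem.Set.contains (PySem.Set.add seen (y, x)) ((y.toNat : Int), (x.toNat : Int)) = true := by
          rw [hcont]; right; rw [hyc, hxc]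
        rw [if_pos this]
      · have : ((mA.getD y.toNat []).set x.toNat count).getD j "" = (mA.getD y.toNat []).getD j "" := by
          simp only [List.getD]; rw [List.getElem?_set_ne hj]
        rw [this, h3 y.toNat j hyn hjm]
        have hne : ¬ (((y.toNat : Int), (j : Int)) = (y, x)) := by
          intro hp
          apply hj
          have := congrArg Prod.snd hp
          simp at this
          omega
        by_cases hm : ((y.toNat : Int), (j : Int)) ∈ seen
        · rw [if_pos (by rwa [PySem.Set.contains_iff]), if_pos (by rw [hcont]; exact Or.inl hm)]
        · rw [if_neg (by rw [PySem.Set.contains_iff]; exact hm),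
              if_neg (by rw [hcont]; rintro (h | h) <;> [exact hm h; exact hne h])]
    · have hrow : ((mA.set y.toNat ((mA.getD y.toNat []).set x.toNat count)).getD i []) = mA.getD i [] := by
        simp only [List.getD]; rw [List.getElem?_set_ne hi]
      rw [hrow, h3 i j him hjm]
      have hne : ¬ (((i : Int), (j : Int)) = (y, x)) := by
        intro hp
        apply hi
        have := congrArg Prod.fst hp
        simp at this
        omega
      by_cases hm : ((i : Int), (j : Int)) ∈ seen
      · rw [if_pos (by rwa [PySem.Set.contains_iff]), if_pos (by rw [hcont]; exact Or.inl hm)]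
      · rw [if_neg (by rw [PySem.Set.contains_iff]; exact hm),
            if_neg (by rw [hcont]; rintro (h | h) <;> [exact hm h; exact hne h])]

lemma loop_eq (count : String) (memo : List (String × Bool)) :
    ∀ (fuel : Nat) (y x prof : Int) (m0 mA : List (List String)) (seen : PySem.Set (Int × Int)),
      MEq m0 mA seen count →
      dfsA fuel (y, x) mA prof count memo = dfsLoop fuel y x m0 prof count memo seen := by
  intro fuel
  induction fuel with
  | zero => intro y x prof m0 mA seen _; rfl
  | succ n ih =>
    intro y x prof m0 mA seen h
    obtain ⟨h1, h2, h3⟩ := h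
    by_cases hb : 0 ≤ y ∧ y < (m0.length : Int) ∧ 0 ≤ x ∧ x < ((m0.getD y.toNat []).length : Int)
    · obtain ⟨hy0, hy, hx0, hx⟩ := hb
      have hyn : y.toNat < m0.length := by omega
      have hxn : x.toNat < (m0.getD y.toNat []).length := by omega
      have hyc : ((y.toNat : Int)) = y := Int.toNat_of_nonneg hy0
      have hxc : ((x.toNat : Int)) = x := Int.toNat_of_nonneg hx0
      have hbA : 0 ≤ y ∧ y < (mA.length : Int) ∧ 0 ≤ x ∧ x < ((mA.getD y.toNat []).length : Int) := by
        refine ⟨hy0, by rw [h1]; exact hy, hx0, by rw [h2 y.toNat]; exact hx⟩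
      have hval : (mA.getD y.toNat []).getD x.toNat "" =
          (if PySem.Set.contains seen (y, x) then count else (m0.getD y.toNat []).getD x.toNat "") := by
        have := h3 y.toNat x.toNat hyn hxn
        rwa [hyc, hxc] at this
      have hgv : getValue (y, x) mA =
          some (if PySem.Set.contains seen (y, x) then count else (m0.getD y.toNat []).getD x.toNat "") := by
        rw [getValue, if_pos hbA, hval]
      simp only [dfsA, dfsLoop]
      rw [hgv, if_pos (⟨hy0, hy, hx0, hx⟩ : 0 ≤ y ∧ y < (m0.length : Int) ∧ 0 ≤ x ∧ x < ((m0.getD y.toNat []).length : Int))]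
      dsimp only
      set v := (if PySem.Set.contains seen (y, x) then count else (m0.getD y.toNat []).getD x.toNat "") with hv
      have hstep := MEq_step m0 mA seen count y x hy0 hy hx0 hx ⟨h1, h2, h3⟩
      by_cases hd : PySem.Str.strIsdigit v = true
      · rw [if_pos hd, if_pos hd]
        by_cases hc : v = count
        · rw [if_pos hc, if_pos (Or.inl hc)]
        · rw [if_neg hc]
          cases hq : (PySem.Dict.mk memo).get? v with
          | none =>
            rw [if_pos (Or.inl (by rw [PySem.Dict.contains_eq_isSome_get?, hq]; simp)),
                if_pos (Or.inr (by simp))]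
          | some b =>
            cases b with
            | true =>
              rw [if_pos (Or.inr (by simp)), if_pos (Or.inr (by simp))]
            | false =>
              rw [if_neg, if_neg]
              · rintro (hc' | hb'); exact hc hc'; simp at hb'
              · rintro (hn | hb')
                · exact hn (by rw [PySem.Dict.contains_eq_isSome_get?, hq]; rfl)
                · simp at hb'
      · rw [if_neg hd, if_neg hd]
        by_cases hV : v = "V"
        · rw [if_pos hV, show pvMoves.get? v = some (1, 0) from by rw [hV]; rfl]
          rw [ih (y + 1) x (prof + 1) m0 _ _ hstep]; norm_num
        · by_cases hA : v = "A"
          · rw [if_neg hV, if_pos hA, show pvMoves.get? v = some (-1, 0) from by rw [hA]; rfl]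
            rw [ih (y - 1) x (prof + 1) m0 _ _ hstep]; norm_num; rw [sub_eq_add_neg]
          · by_cases hR : v = ">"
            · rw [if_neg hV, if_neg hA, if_pos hR, show pvMoves.get? v = some (0, 1) from by rw [hR]; rfl]
              rw [ih y (x + 1) (prof + 1) m0 _ _ hstep]; norm_num
            · by_cases hL : v = "<"
              · rw [if_neg hV, if_neg hA, if_neg hR, if_pos hL,
                    show pvMoves.get? v = some (0, -1) from by rw [hL]; rfl]
                rw [ih y (x - 1) (prof + 1) m0 _ _ hstep]; norm_num; rw [sub_eq_add_neg]
              · rw [if_neg hV, if_neg hA, if_neg hR, if_neg hL,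
                    show pvMoves.get? v = none from by
                      simp [pvMoves, PySem.Dict.get?,
                            Ne.symm hV, Ne.symm hA, Ne.symm hR, Ne.symm hL]]
    · -- out of bounds: both return 0
      have hbA : ¬ (0 ≤ y ∧ y < (mA.length : Int) ∧ 0 ≤ x ∧ x < ((mA.getD y.toNat []).length : Int)) := by
        rw [h1, h2 y.toNat]; exact hb
      show (match getValue (y, x) mA with
            | none => (0:Int)
            | some valor => _) = _
      rw [getValue, if_neg hbA]
      rw [dfsLoop]
      rw [if_neg hb]

-- ===== VERDICT =====
theorem dfs_spec : Claim_equal_dfs := by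
  intro pos matrix prof count memo _ _
  unfold Spec_dfs dfs dfs_alt
  exact loop_eq count memo (pvFuel matrix) pos.1 pos.2 prof matrix matrix PySem.Set.empty (MEq_nil matrix count)
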